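-- pv_equiv track=rewrite | github.com/AlinaRinn/LearningPython | PythonProj3/PythonProj3.py | perevertish
-- ===== SOURCE A (Python) =====
-- def perevertish(a):
--     b = a.split(' ')
--     c = ''
--     for i in b:
--         if len(i) >= 5:
--             c += ''.join(reversed(i))
--         c += ' '
--     return c
-- ===== SOURCE B (Python) =====
-- def perevertish(a):
--     # single pass over characters, no split(): maintain a current-word buffer
--     out = []
--     buf = []
--     for ch in a:
--         if ch == ' ':
--             if len(buf) >= 5:
--                 out.extend(reversed(buf))
--             out.append(' ')
--             buf = []
--         else:
--             buf.append(ch)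
--     if len(buf) >= 5:
--         out.extend(reversed(buf))
--     out.append(' ')
--     return ''.join(out)
-- ===== Notes on version B (the rewrite author's own statement) =====
-- stated objective: alternative
-- what changed: B replaces the split-on-space call plus a per-word loop with a single character scan that maintains a current-word buffer and flushes it (reversed when length >= 5) at each space and at the end.
import Mathlib
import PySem

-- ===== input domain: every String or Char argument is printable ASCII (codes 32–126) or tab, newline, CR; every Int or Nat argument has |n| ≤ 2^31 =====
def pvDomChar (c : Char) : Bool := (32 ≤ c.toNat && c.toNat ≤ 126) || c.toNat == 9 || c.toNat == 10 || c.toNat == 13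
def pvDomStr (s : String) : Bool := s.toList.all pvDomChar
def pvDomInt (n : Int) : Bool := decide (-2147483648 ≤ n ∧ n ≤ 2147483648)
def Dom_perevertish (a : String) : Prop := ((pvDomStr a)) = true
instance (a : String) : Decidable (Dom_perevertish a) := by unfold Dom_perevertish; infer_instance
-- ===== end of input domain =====

-- B replaces the split-on-space-and-loop-over-words decomposition with one character scan keeping a current-word buffer; same output (alternative decomposition, no speed claim).
-- ===== PORT A =====
-- b = a.split(' '); c = ''; for i in b: if len(i) >= 5: c += ''.join(reversed(i)); c += ' '
def perevertish (a : String) : String :=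
  let b := PySem.Chars.splitOn a.toList [' ']
  let c := b.foldl (fun c i => (if 5 ≤ i.length then c ++ i.reverse else c) ++ [' ']) []
  String.ofList c

-- ===== PORT B =====
-- flush of the buffer: reversed if length >= 5, else nothing
def pvFlush (buf : List Char) : List Char := if 5 ≤ buf.length then buf.reverse else []

-- the character loop of Source B: state (out, buf)
def pvScan : List Char → List Char → List Char → List Char
  | [], out, buf => out ++ pvFlush buf ++ [' ']
  | ch :: rest, out, buf =>
      if ch = ' ' then pvScan rest (out ++ pvFlush buf ++ [' ']) []
      else pvScan rest out (buf ++ [ch])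

def perevertish_alt (a : String) : String := String.ofList (pvScan a.toList [] [])

-- ===== PRECONDITION & SPEC =====
def Spec_perevertish (a : String) (out : String) : Prop := out = perevertish_alt a
instance (a : String) (out : String) : Decidable (Spec_perevertish a out) := by unfold Spec_perevertish; infer_instance

-- ===== CLAIM (what is proved, stated in full; the proofs are below) =====
def Claim_equal_perevertish : Prop := ∀ (a : String), Dom_perevertish a → Spec_perevertish a (perevertish a)

-- ===== LEMMAS AND PROOFS =====

-- the tokens of l split on ' ', with cur the (reversed) partial current word — reference shape for both ports
def pvTokens : List Char → List Char → List (List Char)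
  | cur, [] => [cur.reverse]
  | cur, c :: r => if c = ' ' then cur.reverse :: pvTokens [] r else pvTokens (c :: cur) r

theorem pvSplitOn_go_eq (fuel : ℕ) : ∀ (l cur : List Char) (acc : List (List Char)), l.length ≤ fuel →
    PySem.Chars.splitOn.go [' '] fuel l cur acc = acc.reverse ++ pvTokens cur l := by
  induction fuel with
  | zero =>
    intro l cur acc h
    have : l = [] := by cases l <;> simp_all
    subst this
    simp [PySem.Chars.splitOn.go, pvTokens]
  | succ n ih =>
    intro l cur acc h
    cases l with
    | nil => simp [PySem.Chars.splitOn.go, pvTokens]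
    | cons c rest =>
      rw [PySem.Chars.splitOn.go.eq_def]
      by_cases hc : c = ' '
      · subst hc
        simp only [pvTokens]
        rw [if_pos (by simp [List.isPrefixOf])]
        rw [ih _ _ _ (by simpa using Nat.le_of_succ_le_succ h)]
        simp
      · simp only [pvTokens, if_neg hc]
        rw [if_neg (by simp [List.isPrefixOf, Ne.symm hc])]
        exact ih _ _ _ (by simpa using Nat.le_of_succ_le_succ h)

theorem pvSplitOn_eq (l : List Char) : PySem.Chars.splitOn l [' '] = pvTokens [] l := by
  rw [PySem.Chars.splitOn, pvSplitOn_go_eq (l.length + 1) l [] [] (by omega)]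
  rfl

-- the per-token contribution shared by both ports
def pvG (i : List Char) : List Char := (if 5 ≤ i.length then i.reverse else []) ++ [' ']

theorem pvFold_eq (ts : List (List Char)) : ∀ c0 : List Char,
    ts.foldl (fun c i => (if 5 ≤ i.length then c ++ i.reverse else c) ++ [' ']) c0
      = c0 ++ ts.flatMap pvG := by
  induction ts with
  | nil => simp
  | cons t ts ih =>
    intro c0
    simp only [List.foldl_cons, List.flatMap_cons, ih, pvG]
    split_ifs <;> simp

theorem pvScan_eq (l : List Char) : ∀ out buf : List Char,
    pvScan l out buf = out ++ (pvTokens buf.reverse l).flatMap pvG := by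
  induction l with
  | nil => intro out buf; simp [pvScan, pvTokens, pvG, pvFlush]
  | cons c r ih =>
    intro out buf
    by_cases hc : c = ' '
    · subst hc
      simp only [pvScan, pvTokens, ih]
      simp [pvG, pvFlush]
    · simp only [pvScan, pvTokens, if_neg hc, ih]
      congr 2
      simp

-- ===== VERDICT (by name: the statement is the Claim_ definition above) =====
theorem perevertish_spec : Claim_equal_perevertish := by
  intro a _
  show perevertish a = perevertish_alt a
  unfold perevertish perevertish_alt
  simp only [pvSplitOn_eq, pvFold_eq, pvScan_eq]
  simp
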